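-- pv_equiv track=rewrite | github.com/NAMYUNWOO/ProblemSolving | 4주차/practice1.py | jjb
-- ===== SOURCE A (Python) =====
-- def jjb(schedule):
--     '''
--         최대로 얻을 수 있는 만족감을 리턴하세요.
--     '''
--     prev_list = [0] * 3
--     cur_list = [0] * 3
--     for ele in schedule:
--         cur_list[0] = max(prev_list[1], prev_list[2]) + ele[0]
--         cur_list[1] = max(prev_list[0], prev_list[2]) + ele[1]
--         cur_list[2] = max(prev_list[0], prev_list[1]) + ele[2]
--         prev_list = cur_list[:]
--
--     return max(prev_list)
-- ===== SOURCE B (Python) =====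
-- def jjb(schedule):
--     # Track only the best value, its choice index, and the second-best value
--     # of the "ends with choice c" DP row, instead of the full 3-entry row:
--     # the best total ending in c is (second-best if c was the argmax else best) + row[c].
--     best1, i1, best2 = 0, -1, 0
--     for row in schedule:
--         v0 = (best2 if i1 == 0 else best1) + row[0]
--         v1 = (best2 if i1 == 1 else best1) + row[1]
--         v2 = (best2 if i1 == 2 else best1) + row[2]
--         if v0 >= v1 and v0 >= v2:
--             best1, i1, best2 = v0, 0, max(v1, v2)
--         elif v1 >= v2:
--             best1, i1, best2 = v1, 1, max(v0, v2)
--         else: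
--             best1, i1, best2 = v2, 2, max(v0, v1)
--     return best1
-- ===== Notes on version B (the rewrite author's own statement) =====
-- stated objective: alternative
-- what changed: Instead of carrying the full 3-entry DP row (best total ending in each choice) and taking max-of-the-other-two per entry, B carries only the row's best value, its choice index, and the second-best value, computing each new entry as (second-best if that choice was the argmax else best) + satisfaction.
import Mathlib
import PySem

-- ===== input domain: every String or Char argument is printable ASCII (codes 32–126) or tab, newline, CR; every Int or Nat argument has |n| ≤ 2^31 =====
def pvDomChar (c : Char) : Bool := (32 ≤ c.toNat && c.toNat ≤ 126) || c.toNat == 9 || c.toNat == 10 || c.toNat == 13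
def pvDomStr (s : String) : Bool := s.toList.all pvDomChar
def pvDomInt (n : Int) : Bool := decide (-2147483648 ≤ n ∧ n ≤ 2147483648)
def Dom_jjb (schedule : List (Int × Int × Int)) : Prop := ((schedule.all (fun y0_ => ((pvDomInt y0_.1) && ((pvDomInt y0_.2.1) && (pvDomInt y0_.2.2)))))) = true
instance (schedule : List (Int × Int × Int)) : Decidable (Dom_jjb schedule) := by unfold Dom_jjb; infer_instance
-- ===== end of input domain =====

-- B replaces A's full 3-entry DP row by (best value, its choice index, second-best value); alternative mechanism, same O(n) cost.


-- ===== PORT A =====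
-- prev_list/cur_list are 3-element lists with constant in-range indices; ported as a triple.
def jjbStepA (prev : Int × Int × Int) (ele : Int × Int × Int) : Int × Int × Int :=
  (max prev.2.1 prev.2.2 + ele.1,
   max prev.1 prev.2.2 + ele.2.1,
   max prev.1 prev.2.1 + ele.2.2)

def jjb (schedule : List (Int × Int × Int)) : Int :=
  let prev := schedule.foldl jjbStepA (0, 0, 0)
  max prev.1 (max prev.2.1 prev.2.2)

-- ===== PORT B =====
-- state = (best1, i1, best2): best row value, its choice index (-1 initially), second-best row value
def jjbStepB (s : Int × Int × Int) (row : Int × Int × Int) : Int × Int × Int :=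
  let v0 := (if s.2.1 = 0 then s.2.2 else s.1) + row.1
  let v1 := (if s.2.1 = 1 then s.2.2 else s.1) + row.2.1
  let v2 := (if s.2.1 = 2 then s.2.2 else s.1) + row.2.2
  if v1 ≤ v0 ∧ v2 ≤ v0 then (v0, 0, max v1 v2)
  else if v2 ≤ v1 then (v1, 1, max v0 v2)
  else (v2, 2, max v0 v1)

def jjb_alt (schedule : List (Int × Int × Int)) : Int :=
  (schedule.foldl jjbStepB (0, -1, 0)).1

-- ===== PRECONDITION & SPEC =====
def Spec_jjb (schedule : List (Int × Int × Int)) (out : Int) : Prop := out = jjb_alt schedule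
instance (schedule : List (Int × Int × Int)) (out : Int) : Decidable (Spec_jjb schedule out) := by unfold Spec_jjb; infer_instance

-- ===== CLAIM (what is proved, stated in full; the proofs are below) =====
def Claim_equal_jjb : Prop := ∀ (schedule : List (Int × Int × Int)), Dom_jjb schedule → Spec_jjb schedule (jjb schedule)

-- ===== LEMMAS AND PROOFS =====
-- B's compressed state faithfully summarises A's row: best1 is the row maximum, and for
-- each choice c, "second-best if c is the stored argmax else best1" is the max of the row's other two entries.
def jjbInv (p s : Int × Int × Int) : Prop :=
  s.1 = max p.1 (max p.2.1 p.2.2) ∧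
  (if s.2.1 = 0 then s.2.2 else s.1) = max p.2.1 p.2.2 ∧
  (if s.2.1 = 1 then s.2.2 else s.1) = max p.1 p.2.2 ∧
  (if s.2.1 = 2 then s.2.2 else s.1) = max p.1 p.2.1

set_option maxHeartbeats 1000000 in
theorem jjbInv_step (p s e : Int × Int × Int) (h : jjbInv p s) :
    jjbInv (jjbStepA p e) (jjbStepB s e) := by
  obtain ⟨p0, p1, p2⟩ := p
  obtain ⟨b1, i1, b2⟩ := s
  obtain ⟨e0, e1, e2⟩ := e
  obtain ⟨h1, h2, h3, h4⟩ := h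
  simp only [jjbInv, jjbStepA, jjbStepB] at h1 h2 h3 h4 ⊢
  split_ifs at h2 h3 h4 ⊢ <;> dsimp only at * <;> omega

theorem jjbInv_foldl (l : List (Int × Int × Int)) (p s : Int × Int × Int) (h : jjbInv p s) :
    jjbInv (l.foldl jjbStepA p) (l.foldl jjbStepB s) := by
  induction l generalizing p s with
  | nil => exact h
  | cons e t ih => exact ih _ _ (jjbInv_step p s e h)

-- ===== VERDICT (by name: the statement is the Claim_ definition above) =====
theorem jjb_spec : Claim_equal_jjb := by
  intro schedule _
  have h := jjbInv_foldl schedule (0, 0, 0) (0, -1, 0) (by unfold jjbInv; norm_num)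
  unfold Spec_jjb jjb jjb_alt
  exact h.1.symm
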